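-- pv_equiv track=rewrite | github.com/sastels/advent-of-code-2023 | src/day01/day01.py | replace_first_number
-- ===== SOURCE A (Python) =====
-- numbers = {"one": "1", "two": "2", "three": "3", "four": "4", "five": "5", "six": "6", "seven": "7", "eight": "8", "nine": "9"}
--
-- def replace_first_number(s: str) -> str:
--     to_replace = ("", -1)
--     for k in numbers.keys():
--         first_k = s.find(k)
--         if first_k == -1:
--             continue
--         elif first_k < to_replace[1] or to_replace[1] == -1:
--             to_replace = (k, first_k)
--     if to_replace[1] == -1:
--         return s
--     else:
--         return s.replace(to_replace[0], numbers[to_replace[0]], 1)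
-- ===== SOURCE B (Python) =====
-- numbers = {"one": "1", "two": "2", "three": "3", "four": "4", "five": "5", "six": "6", "seven": "7", "eight": "8", "nine": "9"}
--
-- def replace_first_number(s: str) -> str:
--     # single left-to-right positional scan; return at the first position where a word matches
--     for i in range(len(s)):
--         for word, digit in numbers.items():
--             if s.startswith(word, i):
--                 return s[:i] + digit + s[i + len(word):]
--     return s
-- ===== Notes on version B (the rewrite author's own statement) =====
-- stated objective: alternative
-- what changed: Replaces A's nine full str.find scans plus min-selection and a re-scanning str.replace with a single left-to-right positional pass that returns the spliced string at the first position where any number word matches.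
import Mathlib
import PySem

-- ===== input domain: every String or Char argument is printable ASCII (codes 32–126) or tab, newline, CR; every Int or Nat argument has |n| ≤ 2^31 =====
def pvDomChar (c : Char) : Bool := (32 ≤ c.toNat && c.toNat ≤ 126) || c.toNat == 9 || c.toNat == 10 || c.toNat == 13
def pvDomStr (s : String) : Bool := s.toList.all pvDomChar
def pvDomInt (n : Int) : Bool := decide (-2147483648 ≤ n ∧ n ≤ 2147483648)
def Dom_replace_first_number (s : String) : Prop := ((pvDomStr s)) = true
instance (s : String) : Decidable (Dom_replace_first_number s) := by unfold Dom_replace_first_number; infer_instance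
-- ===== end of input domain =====

-- B replaces A's nine full str.find scans + min-selection + re-scanning str.replace by one
-- left-to-right positional pass that splices at the first position where any number word matches.

-- the module-level dict `numbers`, in insertion order (as lists of chars)
def pvWords : List (List Char × List Char) :=
  [("one".toList, "1".toList), ("two".toList, "2".toList), ("three".toList, "3".toList),
   ("four".toList, "4".toList), ("five".toList, "5".toList), ("six".toList, "6".toList),
   ("seven".toList, "7".toList), ("eight".toList, "8".toList), ("nine".toList, "9".toList)]

-- ===== PORT A =====
-- loop body of A's `for k in numbers.keys(): …` updating to_replace
def pvStep (cs : List Char) (acc : List Char × Int) (kv : List Char × List Char) : List Char × Int :=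
  let first_k := PySem.Chars.find cs kv.1
  if first_k = -1 then acc
  else if first_k < acc.2 ∨ acc.2 = -1 then (kv.1, first_k) else acc

-- numbers[k]; in A the key is always a dict key, so the default is unreachable
def pvNumbersGet (k : List Char) : List Char :=
  ((pvWords.find? (fun kv => kv.1 == k)).getD ([], [])).2

-- s.replace(old, new, 1): exact CPython semantics for the nonempty `old` A passes
def pvReplaceOnce (cs old new : List Char) : List Char :=
  let i := PySem.Chars.find cs old
  if i = -1 then cs else cs.take i.toNat ++ new ++ cs.drop (i.toNat + old.length)

def replace_first_number (s : String) : String :=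
  let to_replace := pvWords.foldl (pvStep s.toList) ([], -1)
  if to_replace.2 = -1 then s
  else String.ofList (pvReplaceOnce s.toList to_replace.1 (pvNumbersGet to_replace.1))

-- ===== PORT B =====
-- inner loop of B: first (digit, len word) whose word matches at the current position
def pvTryAt (ws : List (List Char × List Char)) (cs : List Char) : Option (List Char × Nat) :=
  match ws with
  | [] => none
  | kv :: rest => if kv.1.isPrefixOf cs then some (kv.2, kv.1.length) else pvTryAt rest cs

-- outer positional scan of B (position i realised as the recursion depth)
def pvAltScan (cs : List Char) : List Char :=
  match cs with
  | [] => []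
  | c :: rest =>
    match pvTryAt pvWords (c :: rest) with
    | some (d, n) => d ++ (c :: rest).drop n
    | none => c :: pvAltScan rest

def replace_first_number_alt (s : String) : String := String.ofList (pvAltScan s.toList)

-- ===== PRECONDITION & SPEC =====
def Spec_replace_first_number (s : String) (out : String) : Prop := out = replace_first_number_alt s
instance (s : String) (out : String) : Decidable (Spec_replace_first_number s out) := by unfold Spec_replace_first_number; infer_instance

-- ===== CLAIM (what is proved, stated in full; the proofs are below) =====
def Claim_equal_replace_first_number : Prop := ∀ (s : String), Dom_replace_first_number s → Spec_replace_first_number s (replace_first_number s)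

-- ===== LEMMAS AND PROOFS =====

-- concrete facts about the nine number words
theorem pvWords_find?_self : ∀ kv ∈ pvWords, pvWords.find? (fun e => e.1 == kv.1) = some kv := by decide

theorem pvWords_no_prefix : ∀ kv ∈ pvWords, ∀ kv' ∈ pvWords, kv.1 <+: kv'.1 → kv = kv' := by decide

theorem pvTryAt_nil : pvTryAt pvWords [] = none := by decide

-- uniqueness: at any one position at most one number word matches
theorem pvWords_unique {kv kv' : List Char × List Char} (h : kv ∈ pvWords) (h' : kv' ∈ pvWords)
    {u : List Char} (p : kv.1 <+: u) (p' : kv'.1 <+: u) : kv = kv' := by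
  rcases List.prefix_or_prefix_of_prefix p p' with hp | hp
  · exact pvWords_no_prefix kv h kv' h' hp
  · exact (pvWords_no_prefix kv' h' kv h hp).symm

theorem pvTryAt_eq_none_iff (ws : List (List Char × List Char)) (cs : List Char) :
    pvTryAt ws cs = none ↔ ∀ kv ∈ ws, ¬ kv.1 <+: cs := by
  induction ws with
  | nil => simp [pvTryAt]
  | cons kv rest ih =>
    simp only [pvTryAt]
    by_cases h : kv.1 <+: cs
    · simp [List.isPrefixOf_iff_prefix.2 h, h]
    · have : kv.1.isPrefixOf cs = false := by
        rw [Bool.eq_false_iff]; simpa [List.isPrefixOf_iff_prefix] using h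
      simp [this, ih, h]

theorem pvTryAt_eq_some {ws : List (List Char × List Char)} {cs : List Char}
    {d : List Char} {n : Nat} (h : pvTryAt ws cs = some (d, n)) :
    ∃ kv ∈ ws, kv.1 <+: cs ∧ d = kv.2 ∧ n = kv.1.length := by
  induction ws with
  | nil => simp [pvTryAt] at h
  | cons kv rest ih =>
    simp only [pvTryAt] at h
    by_cases hp : kv.1.isPrefixOf cs
    · simp [hp] at h
      exact ⟨kv, List.mem_cons_self, List.isPrefixOf_iff_prefix.1 hp, h.1.symm, h.2.symm⟩
    · simp [hp] at h
      obtain ⟨kv', hm, hpre, hd, hn⟩ := ih h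
      exact ⟨kv', List.mem_cons_of_mem _ hm, hpre, hd, hn⟩

theorem pvTryAt_eq_some_of_unique {ws : List (List Char × List Char)} {cs : List Char}
    {kv₀ : List Char × List Char} (hmem : kv₀ ∈ ws) (hpre : kv₀.1 <+: cs)
    (huniq : ∀ kv ∈ ws, kv.1 <+: cs → kv = kv₀) :
    pvTryAt ws cs = some (kv₀.2, kv₀.1.length) := by
  induction ws with
  | nil => simp at hmem
  | cons kv rest ih =>
    simp only [pvTryAt]
    by_cases hp : kv.1.isPrefixOf cs
    · have hkk : kv = kv₀ := huniq kv List.mem_cons_self (List.isPrefixOf_iff_prefix.1 hp)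
      subst hkk; simp [hp]
    · have hkv : ¬ kv.1 <+: cs := fun h => hp (List.isPrefixOf_iff_prefix.2 h)
      have hmem' : kv₀ ∈ rest := by
        rcases List.mem_cons.1 hmem with rfl | h
        · exact absurd hpre hkv
        · exact h
      simp [hp]
      exact ih hmem' (fun kv' h' hp' => huniq kv' (List.mem_cons_of_mem _ h') hp')

-- a word matching at some position occurs in cs
theorem infix_of_prefix_drop {sub cs : List Char} {i : Nat} (h : sub <+: cs.drop i) : sub <:+: cs :=
  h.isInfix.trans (List.drop_suffix i cs).isInfix

-- B leaves cs unchanged when no word occurs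
theorem pvAltScan_id (cs : List Char) (h : ∀ kv ∈ pvWords, ¬ kv.1 <:+: cs) : pvAltScan cs = cs := by
  induction cs with
  | nil => rfl
  | cons c rest ih =>
    have hnone : pvTryAt pvWords (c :: rest) = none :=
      (pvTryAt_eq_none_iff _ _).2 (fun kv hm hp => h kv hm hp.isInfix)
    simp only [pvAltScan, hnone]
    rw [ih (fun kv hm hi => h kv hm (hi.trans (List.suffix_cons c rest).isInfix))]

-- B's scan splices at position j when nothing matches before j and something matches at j
theorem pvAltScan_splice : ∀ (cs : List Char) (j : Nat) (d : List Char) (n : Nat),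
    (∀ i < j, pvTryAt pvWords (cs.drop i) = none) →
    pvTryAt pvWords (cs.drop j) = some (d, n) →
    pvAltScan cs = cs.take j ++ d ++ cs.drop (j + n) := by
  intro cs
  induction cs with
  | nil => intro j d n _ hsome; rw [List.drop_nil] at hsome; rw [pvTryAt_nil] at hsome; cases hsome
  | cons c rest ih =>
    intro j d n hnone hsome
    cases j with
    | zero =>
      simp only [List.drop_zero] at hsome
      simp [pvAltScan, hsome]
    | succ j' =>
      have h0 : pvTryAt pvWords (c :: rest) = none := by
        simpa using hnone 0 (Nat.succ_pos j')
      simp only [pvAltScan, h0]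
      have := ih j' d n (fun i hi => by simpa using hnone (i + 1) (by omega))
        (by simpa using hsome)
      rw [this]
      simp [Nat.succ_add]

-- invariant of A's fold over the keys
def pvInv (cs : List Char) (seen : List (List Char × List Char)) (acc : List Char × Int) : Prop :=
  (acc = ([], -1) ∧ ∀ kv ∈ seen, PySem.Chars.find cs kv.1 = -1) ∨
  (∃ kv ∈ seen, acc = (kv.1, PySem.Chars.find cs kv.1) ∧ PySem.Chars.find cs kv.1 ≠ -1 ∧
     ∀ kv' ∈ seen, acc.2 ≤ PySem.Chars.find cs kv'.1 ∨ PySem.Chars.find cs kv'.1 = -1)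

theorem pvStep_inv {cs : List Char} {seen : List (List Char × List Char)} {acc : List Char × Int}
    (h : pvInv cs seen acc) (kv : List Char × List Char) :
    pvInv cs (seen ++ [kv]) (pvStep cs acc kv) := by
  simp only [pvStep]
  by_cases hf : PySem.Chars.find cs kv.1 = -1
  · simp only [hf]
    rcases h with ⟨hacc, hall⟩ | ⟨kv₀, hm, hacc, hne, hmin⟩
    · exact Or.inl ⟨hacc, by
        intro kv' hm'
        rcases List.mem_append.1 hm' with h' | h'
        · exact hall kv' h'
        · simp at h'; subst h'; exact hf⟩
    · exact Or.inr ⟨kv₀, List.mem_append_left _ hm, hacc, hne, by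
        intro kv' hm'
        rcases List.mem_append.1 hm' with h' | h'
        · exact hmin kv' h'
        · simp at h'; subst h'; exact Or.inr hf⟩
  · simp only [if_neg hf]
    rcases h with ⟨hacc, hall⟩ | ⟨kv₀, hm, hacc, hne, hmin⟩
    · have hcond : PySem.Chars.find cs kv.1 < acc.2 ∨ acc.2 = -1 := Or.inr (by rw [hacc])
      rw [if_pos hcond]
      exact Or.inr ⟨kv, List.mem_append_right _ List.mem_cons_self, rfl, hf, by
        intro kv' hm'
        rcases List.mem_append.1 hm' with h' | h'
        · exact Or.inr (hall kv' h')
        · simp at h'; subst h'; exact Or.inl le_rfl⟩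
    · have hacc2 : acc.2 = PySem.Chars.find cs kv₀.1 := by rw [hacc]
      by_cases hc : PySem.Chars.find cs kv.1 < acc.2 ∨ acc.2 = -1
      · rw [if_pos hc]
        have hlt : PySem.Chars.find cs kv.1 < acc.2 := by
          rcases hc with h' | h'
          · exact h'
          · exact absurd (hacc2 ▸ h') hne
        exact Or.inr ⟨kv, List.mem_append_right _ List.mem_cons_self, rfl, hf, by
          intro kv' hm'
          rcases List.mem_append.1 hm' with h' | h'
          · rcases hmin kv' h' with h'' | h''
            · exact Or.inl (le_of_lt (lt_of_lt_of_le hlt h''))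
            · exact Or.inr h''
          · simp at h'; subst h'; exact Or.inl le_rfl⟩
      · rw [if_neg hc]
        have hc1 : acc.2 ≤ PySem.Chars.find cs kv.1 := by omega
        exact Or.inr ⟨kv₀, List.mem_append_left _ hm, hacc, hne, by
          intro kv' hm'
          rcases List.mem_append.1 hm' with h' | h'
          · exact hmin kv' h'
          · simp at h'; subst h'; exact Or.inl hc1⟩

theorem pvFoldl_inv (cs : List Char) : ∀ (ws seen : List (List Char × List Char)) (acc : List Char × Int),
    pvInv cs seen acc → pvInv cs (seen ++ ws) (ws.foldl (pvStep cs) acc) := by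
  intro ws
  induction ws with
  | nil => intro seen acc h; simpa using h
  | cons kv rest ih =>
    intro seen acc h
    have := ih (seen ++ [kv]) (pvStep cs acc kv) (pvStep_inv h kv)
    simpa [List.append_assoc] using this

-- ===== VERDICT (by name: the statement is the Claim_ definition above) =====
theorem replace_first_number_spec : Claim_equal_replace_first_number := by
  intro s _
  unfold Spec_replace_first_number
  simp only [replace_first_number, replace_first_number_alt]
  have hinv := pvFoldl_inv s.toList pvWords [] ([], -1) (Or.inl ⟨rfl, by simp⟩)
  simp only [List.nil_append] at hinv
  rcases hinv with ⟨hacc, hall⟩ | ⟨kv₀, hm, hacc, hne, hmin⟩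
  · -- no number word occurs in s: both sides return s
    rw [hacc]
    have hno : ∀ kv ∈ pvWords, ¬ kv.1 <:+: s.toList := by
      intro kv hkm
      exact (PySem.Chars.find_eq_neg_one_iff _ _).1 (hall kv hkm)
    rw [pvAltScan_id s.toList hno]
    simp
  · -- kv₀'s first occurrence is the minimal position of any word
    rw [hacc] at hmin ⊢
    set f := PySem.Chars.find s.toList kv₀.1 with hf
    have h0f : 0 ≤ f := by
      have := PySem.Chars.neg_one_le_find (s := s.toList) (sub := kv₀.1)
      rw [← hf] at this; omega
    have hspec := PySem.Chars.find_spec (s := s.toList) (sub := kv₀.1) h0f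
    rw [← hf] at hspec
    set j := f.toNat with hj
    have hpre_j : kv₀.1 <+: s.toList.drop j := hspec.1
    have huniq : ∀ kv ∈ pvWords, kv.1 <+: s.toList.drop j → kv = kv₀ :=
      fun kv hkm hp => pvWords_unique hkm hm hp hpre_j
    have hsome := pvTryAt_eq_some_of_unique hm hpre_j huniq
    have hnone : ∀ i < j, pvTryAt pvWords (s.toList.drop i) = none := by
      intro i hij
      cases htry : pvTryAt pvWords (s.toList.drop i) with
      | none => rfl
      | some dn =>
        exfalso
        obtain ⟨d, n⟩ := dn
        obtain ⟨kv, hkm, hp, -, -⟩ := pvTryAt_eq_some htry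
        have hne' : PySem.Chars.find s.toList kv.1 ≠ -1 :=
          (PySem.Chars.find_ne_neg_one_iff _ _).2 (infix_of_prefix_drop hp)
        have h0' : 0 ≤ PySem.Chars.find s.toList kv.1 := by
          have := PySem.Chars.neg_one_le_find (s := s.toList) (sub := kv.1); omega
        have hspec' := PySem.Chars.find_spec (s := s.toList) (sub := kv.1) h0'
        have hle : (PySem.Chars.find s.toList kv.1).toNat ≤ i := by
          by_contra hlt
          exact hspec'.2 i (by omega) hp
        rcases hmin kv hkm with hle' | heq
        · have := Int.toNat_le_toNat hle'
          omega
        · exact hne' heq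
    rw [if_neg hne]
    rw [pvAltScan_splice s.toList j kv₀.2 kv₀.1.length hnone hsome]
    have hget : pvNumbersGet kv₀.1 = kv₀.2 := by
      rw [pvNumbersGet, pvWords_find?_self kv₀ hm]
      rfl
    rw [hget]
    simp only [pvReplaceOnce]
    rw [← hf, if_neg hne]
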